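-- pv_equiv track=rewrite | github.com/5l1v3r1/public-key-exchange | prime.py | find_integers_for_prime_testing
-- ===== SOURCE A (Python) =====
-- def find_integers_for_prime_testing(n):
--     # n >= 3
--     q = (n-1)
--     k = 0
--     while True:
--         q = q // 2
--         k += 1
--         if q % 2 == 1:
--             return (k, q)
--
--     return (-1, -1)
-- ===== SOURCE B (Python) =====
-- def find_integers_for_prime_testing(n):
--     # closed-form: isolate the lowest set bit of m = (n-1)//2 instead of looping
--     m = (n - 1) // 2
--     t = m & -m
--     return (t.bit_length(), m // t)
-- ===== Notes on version B (the rewrite author's own statement) =====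
-- stated objective: simpler
-- what changed: Replaced A's unbounded halving loop by a branchless closed form: m = (n-1)//2, t = m & -m isolates the lowest set bit, so the answer is (t.bit_length(), m // t).
import Mathlib
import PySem

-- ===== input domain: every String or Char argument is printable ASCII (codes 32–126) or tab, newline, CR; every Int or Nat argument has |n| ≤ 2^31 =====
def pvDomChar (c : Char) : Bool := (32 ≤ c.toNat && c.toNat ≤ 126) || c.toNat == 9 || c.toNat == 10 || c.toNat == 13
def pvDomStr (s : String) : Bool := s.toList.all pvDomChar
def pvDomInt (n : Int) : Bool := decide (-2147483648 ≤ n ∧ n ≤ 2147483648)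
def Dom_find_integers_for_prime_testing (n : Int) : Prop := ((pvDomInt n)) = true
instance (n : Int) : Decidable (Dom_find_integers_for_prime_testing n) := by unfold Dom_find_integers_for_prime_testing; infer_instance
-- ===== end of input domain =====

-- B replaces A's halving loop on m = (n-1)//2 by the closed-form bit computation (m & -m).bit_length(), m // (m & -m) (simpler, loop-free);
-- claim is about the return value on n ≤ 0 or n ≥ 3 (on n = 1, 2 A's 'while True' never returns).


-- ===== PORT A =====
-- A's 'while True' loop, step for step: q = q // 2; k += 1; return (k, q) once q % 2 == 1.
-- The loop is fuelled (64 steps, enough for every |n| ≤ 2^31 inside Pre_): on fuel exhaustion it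
-- returns A's own unreachable sentinel (-1, -1); inside Dom ∧ Pre_ the fuel never runs out.
def findLoopA : Nat → Int → Int → Int × Int
  | 0, _, _ => (-1, -1)
  | fuel + 1, q, k =>
    let q' := PySem.Int.floordiv q 2
    let k' := k + 1
    if PySem.Int.mod q' 2 = 1 then (k', q') else findLoopA fuel q' k'

def find_integers_for_prime_testing (n : Int) : Int × Int :=
  findLoopA 64 (n - 1) 0

-- ===== PORT B =====
def find_integers_for_prime_testing_alt (n : Int) : Int × Int :=
  let m := PySem.Int.floordiv (n - 1) 2
  let t := PySem.Int.band m (-m)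
  ((PySem.Int.bitLength t : Int), PySem.Int.floordiv m t)

-- ===== PRECONDITION & SPEC =====
-- Pre_ excludes exactly n = 1 and n = 2: there m = (n-1)//2 reaches 0, so A's 'while True'
-- loop never returns (q stays 0, always even) and B raises ZeroDivisionError on m // 0.
def Pre_find_integers_for_prime_testing (n : Int) : Prop := n ≤ 0 ∨ 3 ≤ n
instance (n : Int) : Decidable (Pre_find_integers_for_prime_testing n) := by unfold Pre_find_integers_for_prime_testing; infer_instance
def pvWitness_find_integers_for_prime_testing : Int := 13

def Spec_find_integers_for_prime_testing (n : Int) (out : Int × Int) : Prop := out = find_integers_for_prime_testing_alt n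
instance (n : Int) (out : Int × Int) : Decidable (Spec_find_integers_for_prime_testing n out) := by unfold Spec_find_integers_for_prime_testing; infer_instance

-- ===== CLAIM (what is proved, stated in full; the proofs are below) =====
def Claim_equal_find_integers_for_prime_testing : Prop := ∀ (n : Int), Dom_find_integers_for_prime_testing n → Pre_find_integers_for_prime_testing n → Spec_find_integers_for_prime_testing n (find_integers_for_prime_testing n)

-- ===== LEMMAS AND PROOFS =====

-- a &&& (a - 1) clears the lowest set bit: for a = 2^v * o with o odd it equals 2^v * (o - 1).
theorem pv_land_pred (v : Nat) : ∀ o : Nat, o % 2 = 1 →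
    (2 ^ v * o) &&& (2 ^ v * o - 1) = 2 ^ v * (o - 1) := by
  induction v with
  | zero =>
    intro o ho
    have h1 : 2 ^ 0 * o = Nat.bit true (o / 2) := by simp [Nat.bit]; omega
    have h2 : 2 ^ 0 * o - 1 = Nat.bit false (o / 2) := by simp [Nat.bit]; omega
    rw [h2, h1, Nat.land_bit]
    simp [Nat.bit, Nat.and_self]
    omega
  | succ v ih =>
    intro o ho
    have hpos : 1 ≤ 2 ^ v * o := Nat.mul_pos (Nat.two_pow_pos v) (by omega)
    have key : 2 ^ (v + 1) * o = 2 * (2 ^ v * o) := by ring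
    have h1 : 2 ^ (v + 1) * o = Nat.bit false (2 ^ v * o) := by
      simp only [Nat.bit, cond]; omega
    have h2 : 2 ^ (v + 1) * o - 1 = Nat.bit true (2 ^ v * o - 1) := by
      simp only [Nat.bit, cond]; omega
    rw [h2, h1, Nat.land_bit, ih o ho]
    have key2 : 2 ^ (v + 1) * (o - 1) = 2 * (2 ^ v * (o - 1)) := by ring
    simp only [Nat.bit, Bool.false_and, cond]
    omega

-- m & -m isolates the lowest set bit (Python two's-complement semantics, both signs).
theorem pv_band_neg_self (m : Int) (v o : Nat) (ho : o % 2 = 1)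
    (hm : m ≠ 0) (habs : m.natAbs = 2 ^ v * o) :
    PySem.Int.band m (-m) = ((2 ^ v : Nat) : Int) := by
  have hland := pv_land_pred v o ho
  have hao : 1 ≤ 2 ^ v * o := Nat.mul_pos (Nat.two_pow_pos v) (by omega)
  rcases lt_or_gt_of_ne hm with hneg | hpos
  · have h1 : ¬ 0 ≤ m := by omega
    have h2 : (0 : Int) ≤ -m := by omega
    simp only [PySem.Int.band, if_neg h1, if_pos h2]
    have e1 : (-m).toNat = 2 ^ v * o := by omega
    have e2 : (-m - 1).toNat = 2 ^ v * o - 1 := by omega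
    rw [e1, e2, hland]
    congr 1
    have e3 : 2 ^ v * (o - 1) = 2 ^ v * o - 2 ^ v * 1 := Nat.mul_sub _ _ _
    have : 2 ^ v ≤ 2 ^ v * o := Nat.le_mul_of_pos_right _ (by omega)
    omega
  · have h1 : (0 : Int) ≤ m := by omega
    have h2 : ¬ (0 : Int) ≤ -m := by omega
    simp only [PySem.Int.band, if_pos h1, if_neg h2]
    have e1 : m.toNat = 2 ^ v * o := by omega
    have e2 : (-(-m) - 1).toNat = 2 ^ v * o - 1 := by omega
    rw [e1, e2, hland]
    congr 1
    have e3 : 2 ^ v * (o - 1) = 2 ^ v * o - 2 ^ v * 1 := Nat.mul_sub _ _ _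
    have : 2 ^ v ≤ 2 ^ v * o := Nat.le_mul_of_pos_right _ (by omega)
    omega

theorem pv_bitLength_two_pow (v : Nat) : PySem.Int.bitLength ((2 ^ v : Nat) : Int) = v + 1 := by
  have h1 := PySem.Int.lt_two_pow_bitLength ((2 ^ v : Nat) : Int)
  have h2 := PySem.Int.two_pow_bitLength_le ((2 ^ v : Nat) : Int) (by positivity)
  rw [Int.natAbs_natCast] at h1 h2
  have hv : v < PySem.Int.bitLength ((2 ^ v : Nat) : Int) :=
    (Nat.pow_lt_pow_iff_right (by omega)).mp h1
  have hv2 : PySem.Int.bitLength ((2 ^ v : Nat) : Int) - 1 ≤ v :=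
    (Nat.pow_le_pow_iff_right (by omega)).mp h2
  omega

-- A's loop on q with q // 2 = 2^v * o (o odd) returns (k + 1 + v, o), given fuel > v.
theorem pv_loopA_eq (v : Nat) : ∀ (fuel : Nat) (q k o : Int), ¬ (2 : Int) ∣ o →
    PySem.Int.floordiv q 2 = 2 ^ v * o → v < fuel →
    findLoopA fuel q k = (k + 1 + v, o) := by
  induction v with
  | zero =>
    intro fuel q k o ho hq hf
    obtain ⟨f, rfl⟩ := Nat.exists_eq_succ_of_ne_zero (by omega : fuel ≠ 0)
    simp only [findLoopA, hq]
    have hodd : PySem.Int.mod (2 ^ 0 * o) 2 = 1 := by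
      rcases PySem.Int.mod_two_eq (2 ^ 0 * o) with h | h
      · exact absurd ((PySem.Int.mod_eq_zero_iff_dvd _ _).mp h) (by simpa using ho)
      · exact h
    rw [if_pos hodd]
    norm_num
  | succ v ih =>
    intro fuel q k o ho hq hf
    obtain ⟨f, rfl⟩ := Nat.exists_eq_succ_of_ne_zero (by omega : fuel ≠ 0)
    simp only [findLoopA, hq]
    have heven : PySem.Int.mod (2 ^ (v + 1) * o) 2 = 0 := by
      rw [PySem.Int.mod_eq_zero_iff_dvd]
      exact ⟨2 ^ v * o, by ring⟩
    rw [if_neg (by rw [heven]; norm_num)]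
    have hstep : PySem.Int.floordiv ((2 : Int) ^ (v + 1) * o) 2 = 2 ^ v * o := by
      rw [PySem.Int.floordiv_eq_ediv_of_pos (by norm_num)]
      have : (2 : Int) ^ (v + 1) * o = 2 * (2 ^ v * o) := by ring
      rw [this, Int.mul_ediv_cancel_left _ (by norm_num)]
    rw [ih f _ (k + 1) o ho hstep (by omega)]
    have : (k + 1 + 1 + (v:Int)) = k + 1 + ((v:Nat) + 1 : Nat) := by push_cast; ring
    rw [this]

-- ===== VERDICT (by name: the statement is the Claim_ definition above) =====
theorem find_integers_for_prime_testing_spec : Claim_equal_find_integers_for_prime_testing := by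
  intro n hdom hpre
  have hdom' : -2147483648 ≤ n ∧ n ≤ 2147483648 := by
    simpa [Dom_find_integers_for_prime_testing, pvDomInt] using hdom
  unfold Spec_find_integers_for_prime_testing
  set m := PySem.Int.floordiv (n - 1) 2 with hm_def
  have hm : m ≠ 0 := by
    rcases hpre with h | h
    · have : m < 0 := (PySem.Int.floordiv_lt_iff_lt_mul (by norm_num)).mpr (by omega)
      omega
    · have : (1 : Int) ≤ m := (PySem.Int.le_floordiv_iff_mul_le (by norm_num)).mpr (by omega)
      omega
  have hub : m < 2147483648 := (PySem.Int.floordiv_lt_iff_lt_mul (by norm_num)).mpr (by omega)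
  have hlb : -2147483648 ≤ m := (PySem.Int.le_floordiv_iff_mul_le (by norm_num)).mpr (by omega)
  have ha0 : m.natAbs ≠ 0 := by omega
  obtain ⟨v, o, ho2, habs⟩ := Nat.exists_eq_pow_mul_and_not_dvd ha0 2 (by norm_num)
  have ho : o % 2 = 1 := by omega
  -- the signed odd part of m
  set o' : Int := if 0 ≤ m then (o : Int) else -(o : Int) with ho'_def
  have hoZ : ¬ (2 : Int) ∣ (o : Int) := by exact_mod_cast ho2
  have hmo : m = 2 ^ v * o' := by
    by_cases h : 0 ≤ m
    · simp only [ho'_def, if_pos h]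
      have : m = (m.natAbs : Int) := by omega
      rw [this, habs]; push_cast; ring
    · simp only [ho'_def, if_neg h]
      have : m = -(m.natAbs : Int) := by omega
      rw [this, habs]; push_cast; ring
  have ho'odd : ¬ (2 : Int) ∣ o' := by
    by_cases h : 0 ≤ m <;> simp only [ho'_def, h, if_true, if_false, dvd_neg] <;> exact hoZ
  -- bound on v from |m| ≤ 2^31
  have hvle : 2 ^ v ≤ m.natAbs := by
    rw [habs]; exact Nat.le_mul_of_pos_right _ (by omega)
  have hv31 : v ≤ 31 := by
    have h1 : (2 : Nat) ^ v ≤ 2 ^ 31 := by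
      have : m.natAbs ≤ 2 ^ 31 := by omega
      omega
    exact (Nat.pow_le_pow_iff_right (by omega)).mp h1
  -- A's side
  have hA : find_integers_for_prime_testing n = ((0 : Int) + 1 + v, o') := by
    unfold find_integers_for_prime_testing
    exact pv_loopA_eq v 64 (n - 1) 0 o' ho'odd (by rw [← hm_def, hmo]) (by omega)
  -- B's side
  have hband : PySem.Int.band m (-m) = ((2 ^ v : Nat) : Int) :=
    pv_band_neg_self m v o ho hm habs
  have hdiv : PySem.Int.floordiv m ((2 ^ v : Nat) : Int) = o' := by
    rw [PySem.Int.floordiv_eq_ediv_of_pos (by positivity)]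
    rw [hmo]
    have : ((2 ^ v : Nat) : Int) = (2 : Int) ^ v := by push_cast; ring
    rw [this, Int.mul_ediv_cancel_left _ (by positivity)]
  have hB : find_integers_for_prime_testing_alt n = (((v : Int) + 1), o') := by
    show (((PySem.Int.bitLength (PySem.Int.band m (-m)) : Nat) : Int),
          PySem.Int.floordiv m (PySem.Int.band m (-m))) = _
    rw [hband, pv_bitLength_two_pow, hdiv]
    push_cast; ring_nf
  rw [hA, hB]
  norm_num [add_comm]
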